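-- pv_equiv track=rewrite | github.com/Markyneos/LabprogramacaoCC2Mb | LabprogramacaoCC2Mb-main/1B/exemplos/aula_10/desafio1.py | n_max
-- ===== SOURCE A (Python) =====
-- def n_max(n, lista):
--     lista2 = list(lista)
--     for _ in range(len(lista2) - n):
--         menor = lista2[0]
--         for j in range(len(lista2)):
--             if menor > lista2[j]:
--                 menor = lista2[j]
--         for j in range(len(lista2)):
--             if lista2[j] == menor:
--                 lista2.pop(j)
--                 break
--     return lista2
-- ===== SOURCE B (Python) =====
-- def n_max(n, lista):
--     # keep the n largest in original order: threshold from one sort, one filtering pass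
--     m = len(lista)
--     k = m - n          # how many smallest elements to drop
--     if k <= 0:
--         return list(lista)
--     s = sorted(lista)
--     t = s[k - 1]       # k-th smallest: the boundary value
--     below = len([x for x in lista if x < t])
--     drop = k - below   # how many copies of t must also be dropped (first occurrences)
--     out = []
--     for x in lista:
--         if x < t:
--             continue
--         if x == t and drop > 0:
--             drop -= 1
--             continue
--         out.append(x)
--     return out
-- ===== Notes on version B (the rewrite author's own statement) =====
-- stated objective: faster
-- what changed: A repeatedly rescans the whole list to find and pop the minimum (len-n times); B sorts once to find the k-th smallest threshold value, counts elements strictly below it, and keeps the survivors in a single filtering pass that also drops the right number of leading threshold ties.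
import Mathlib
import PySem

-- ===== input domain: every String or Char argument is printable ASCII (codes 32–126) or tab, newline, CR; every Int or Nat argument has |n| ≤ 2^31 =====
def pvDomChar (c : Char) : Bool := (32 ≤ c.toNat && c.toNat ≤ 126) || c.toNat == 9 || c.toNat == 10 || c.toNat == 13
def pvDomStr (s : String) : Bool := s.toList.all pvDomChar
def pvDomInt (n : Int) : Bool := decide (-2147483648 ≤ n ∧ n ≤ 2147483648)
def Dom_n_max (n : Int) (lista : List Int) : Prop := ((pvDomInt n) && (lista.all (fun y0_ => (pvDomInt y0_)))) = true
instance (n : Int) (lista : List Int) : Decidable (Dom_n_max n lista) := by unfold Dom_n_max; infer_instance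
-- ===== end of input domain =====

-- B replaces A's repeated min-search-and-pop (quadratic-ish) by one sort giving a threshold
-- value plus a single counting/filtering pass in original order (objective: faster).

-- ===== PORT A =====
-- inner loop "for j …: if lista2[j] == menor: lista2.pop(j); break" = remove first occurrence
def popEq : List Int → Int → List Int
  | [], _ => []
  | x :: xs, v => if x = v then xs else x :: popEq xs v

-- one body of A's outer loop: find the minimum (menor), pop its first occurrence
def aStep (l : List Int) : List Int :=
  match l with
  | [] => []          -- Python raises IndexError (lista2[0]) here; excluded by Pre_
  | x :: xs =>
    let menor := (x :: xs).foldl (fun m v => if m > v then v else m) x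
    popEq (x :: xs) menor

-- "for _ in range(len(lista2) - n)"
def aLoop : Nat → List Int → List Int
  | 0, l => l
  | K + 1, l => aLoop K (aStep l)

def n_max (n : Int) (lista : List Int) : List Int :=
  aLoop ((lista.length : Int) - n).toNat lista

-- ===== PORT B =====
-- one pass: skip everything below the threshold and the first `drop` copies of it
def filterDrop (t : Int) : Int → List Int → List Int
  | _, [] => []
  | drop, x :: xs =>
    if x < t then filterDrop t drop xs
    else if x = t ∧ 0 < drop then filterDrop t (drop - 1) xs
    else x :: filterDrop t drop xs

def n_max_alt (n : Int) (lista : List Int) : List Int :=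
  let m : Int := lista.length
  let k := m - n
  if k ≤ 0 then lista
  else
    match PySem.List.pyGet? (PySem.List.sorted lista (fun x => x) false) (k - 1) with
    | none => []      -- Python raises IndexError (s[k-1]) here; excluded by Pre_
    | some t =>
      let below : Int := (lista.filter (fun x => x < t)).length
      filterDrop t (k - below) lista

-- ===== PRECONDITION & SPEC =====
-- Pre_ excludes exactly n < 0, where Python A raises IndexError (lista2[0] on the emptied list).
def Pre_n_max (n : Int) (lista : List Int) : Prop := 0 ≤ n
instance (n : Int) (lista : List Int) : Decidable (Pre_n_max n lista) := by unfold Pre_n_max; infer_instance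
def pvWitness_n_max : Int × List Int := (2, [5, 1, 4, 1, 3])

def Spec_n_max (n : Int) (lista : List Int) (out : List Int) : Prop := out = n_max_alt n lista
instance (n : Int) (lista : List Int) (out : List Int) : Decidable (Spec_n_max n lista out) := by unfold Spec_n_max; infer_instance

-- ===== CLAIM (what is proved, stated in full; the proofs are below) =====
def Claim_equal_n_max : Prop := ∀ (n : Int) (lista : List Int), Dom_n_max n lista → Pre_n_max n lista → Spec_n_max n lista (n_max n lista)

-- ===== LEMMAS AND PROOFS =====

-- specification-side description of "drop the K smallest (first occurrences)"
def remK : Nat → List Int → List Int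
  | 0, l => l
  | K + 1, l =>
    match (PySem.List.sorted l (fun x => x) false)[K]? with
    | none => []
    | some t => filterDrop t ((K : Int) + 1 - (l.filter (fun x => x < t)).length) l

theorem popEq_eq_erase (l : List Int) (v : Int) : popEq l v = l.erase v := by
  induction l with
  | nil => rfl
  | cons x xs ih =>
    by_cases h : x = v <;> simp [popEq, List.erase_cons, h, ih]

theorem menor_eq_foldl_min (x : Int) (xs : List Int) :
    (x :: xs).foldl (fun m v => if m > v then v else m) x = xs.foldl min x := by
  have hf : (fun m v : Int => if m > v then v else m) = min := by
    funext m v; by_cases h : m > v <;> simp [min_def, h] <;> omega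
  rw [hf]; simp [List.foldl_cons]

theorem fd_skip (t v : Int) (hv : v < t) :
    ∀ (l : List Int) (d : Int), v ∈ l → filterDrop t d (l.erase v) = filterDrop t d l := by
  intro l
  induction l with
  | nil => intro d h; simp at h
  | cons x xs ih =>
    intro d hmem
    by_cases hx : x = v
    · subst hx
      rw [List.erase_cons_head]
      simp [filterDrop, hv]
    · have hv' : v ∈ xs := by
        rcases List.mem_cons.mp hmem with h | h
        · exact absurd h.symm hx
        · exact h
      rw [List.erase_cons_tail (by simpa using hx)]
      by_cases h1 : x < t
      · simp [filterDrop, h1, ih _ hv']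
      · by_cases h2 : x = t ∧ 0 < d
        · simp [filterDrop, h1, h2, ih _ hv']
        · simp [filterDrop, h1, h2, ih _ hv']

theorem fd_pop (t : Int) :
    ∀ (l : List Int) (d : Int), t ∈ l → 1 ≤ d →
      filterDrop t d l = filterDrop t (d - 1) (l.erase t) := by
  intro l
  induction l with
  | nil => intro d h; simp at h
  | cons x xs ih =>
    intro d hmem hd
    by_cases hx : x = t
    · subst hx
      rw [List.erase_cons_head]
      have hc : (x = x ∧ 0 < d) := ⟨rfl, by omega⟩
      simp [filterDrop, lt_irrefl, hc]
    · have ht' : t ∈ xs := by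
        rcases List.mem_cons.mp hmem with h | h
        · exact absurd h.symm hx
        · exact h
      rw [List.erase_cons_tail (by simpa using hx)]
      by_cases h1 : x < t
      · simp [filterDrop, h1, ih _ ht' hd]
      · have h2 : ¬ (x = t ∧ 0 < d) := by intro h; exact hx h.1
        have h2' : ¬ (x = t ∧ 0 < d - 1) := by intro h; exact hx h.1
        simp [filterDrop, h1, h2, h2', ih _ ht' hd]
        intro h
        exact absurd h hx

theorem fd_zero (t : Int) :
    ∀ l : List Int, (∀ x ∈ l, ¬ x < t) → filterDrop t 0 l = l := by
  intro l
  induction l with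
  | nil => intro _; rfl
  | cons x xs ih =>
    intro h
    have hx := h x (List.mem_cons_self)
    have : ¬ (x = t ∧ (0:Int) < 0) := by intro hh; exact absurd hh.2 (lt_irrefl 0)
    simp [filterDrop, hx, this, ih (fun y hy => h y (List.mem_cons_of_mem _ hy))]

theorem count_erase (t v : Int) (hv : v < t) :
    ∀ l : List Int, v ∈ l →
      (l.filter (fun x => x < t)).length = ((l.erase v).filter (fun x => x < t)).length + 1 := by
  intro l
  induction l with
  | nil => intro h; simp at h
  | cons x xs ih =>
    intro hmem
    by_cases hx : x = v
    · subst hx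
      rw [List.erase_cons_head]
      simp [List.filter_cons, hv]
    · have hv' : v ∈ xs := by
        rcases List.mem_cons.mp hmem with h | h
        · exact absurd h.symm hx
        · exact h
      rw [List.erase_cons_tail (by simpa using hx)]
      by_cases h1 : x < t <;> simp [List.filter_cons, h1, ih hv']

-- the head of sorted l is A's menor (the running minimum)
theorem sorted_head_eq_menor (x : Int) (xs : List Int) (h : Int) (tl : List Int)
    (hs : PySem.List.sorted (x :: xs) (fun y => y) false = h :: tl) :
    h = xs.foldl min x := by
  have hmem : xs.foldl min x ∈ x :: xs := by
    rcases PySem.List.foldl_min_mem xs x with h1 | h1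
    · rw [h1]; exact List.mem_cons_self
    · exact List.mem_cons_of_mem _ h1
  have hle : ∀ y ∈ x :: xs, h ≤ y := PySem.List.key_head_sorted_le _ _ hs
  have hmin := PySem.List.foldl_min_le xs x
  have hh : h ∈ x :: xs := by
    have := PySem.List.mem_sorted (x :: xs) (fun y => y) false h
    rw [hs] at this
    exact this.mp List.mem_cons_self
  have h1 : h ≤ xs.foldl min x := hle _ hmem
  have h2 : xs.foldl min x ≤ h := by
    rcases List.mem_cons.mp hh with hh' | hh'
    · rw [hh']; exact hmin.1
    · exact hmin.2 h hh'
  omega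

theorem sorted_erase_head (l : List Int) (h : Int) (tl : List Int)
    (hs : PySem.List.sorted l (fun y => y) false = h :: tl) :
    PySem.List.sorted (l.erase h) (fun y => y) false = tl := by
  have hperm : (h :: tl).Perm l := by
    have := PySem.List.sorted_perm l (fun y => y) false
    rwa [hs] at this
  have hperm' : tl.Perm (l.erase h) := by
    have := hperm.erase h
    simpa using this
  have hpair : (h :: tl).Pairwise (fun a b : Int => a ≤ b) := by
    have := PySem.List.sorted_pairwise l (fun y => y)
    rwa [hs] at this
  exact PySem.List.sorted_id_eq_of_perm_of_pairwise _ _ hperm' (List.Pairwise.of_cons hpair)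

theorem aStep_erase (x : Int) (xs : List Int) :
    aStep (x :: xs) = (x :: xs).erase (xs.foldl min x) := by
  show popEq (x :: xs) ((x :: xs).foldl (fun m v => if m > v then v else m) x) = _
  rw [menor_eq_foldl_min, popEq_eq_erase]

-- core: one A-step then K removals-by-spec = K+1 removals-by-spec
theorem core_step (K : Nat) (l : List Int) (hne : l ≠ []) (hK : K < l.length) :
    remK K (aStep l) = remK (K + 1) l := by
  obtain ⟨x, xs, rfl⟩ := List.exists_cons_of_ne_nil hne
  have hμmem : xs.foldl min x ∈ x :: xs := by
    rcases PySem.List.foldl_min_mem xs x with h | h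
    · rw [h]; exact List.mem_cons_self
    · exact List.mem_cons_of_mem _ h
  have hμle : ∀ y ∈ x :: xs, xs.foldl min x ≤ y := by
    intro y hy
    rcases List.mem_cons.mp hy with rfl | hy
    · exact (PySem.List.foldl_min_le xs y).1
    · exact (PySem.List.foldl_min_le xs x).2 y hy
  have hsne : PySem.List.sorted (x :: xs) (fun y => y) false ≠ [] := by
    simp [PySem.List.sorted_eq_nil_iff]
  obtain ⟨h, tl, hs⟩ := List.exists_cons_of_ne_nil hsne
  have hh : h = xs.foldl min x := sorted_head_eq_menor x xs h tl hs
  rw [← hh] at hμmem hμle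
  have hlen : tl.length + 1 = (x :: xs).length := by
    have := PySem.List.length_sorted (x :: xs) (fun y => y) false
    rw [hs] at this
    simpa using this
  have hsortErase : PySem.List.sorted ((x :: xs).erase h) (fun y => y) false = tl :=
    sorted_erase_head _ _ _ hs
  rw [aStep_erase, ← hh]
  cases K with
  | zero =>
    have hfil : (x :: xs).filter (fun y => y < h) = [] := by
      refine List.filter_eq_nil_iff.mpr ?_
      intro a ha
      simp only [decide_eq_true_eq]
      exact not_lt.mpr (hμle a ha)
    simp only [remK, hs]
    simp only [List.getElem?_cons_zero, hfil]
    have h1 : ((0 : Nat) : Int) + 1 - (([] : List Int).length : Int) = 1 := by simp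
    rw [h1, fd_pop h (x :: xs) 1 hμmem (le_refl 1)]
    have : (1 : Int) - 1 = 0 := by omega
    rw [this]
    exact (fd_zero h _ (fun y hy => not_lt.mpr (hμle y (List.mem_of_mem_erase hy)))).symm ▸ rfl
  | succ K' =>
    have hK' : K' < tl.length := by
      have := hK; omega
    have ht : tl[K']? = some tl[K'] := List.getElem?_eq_getElem hK'
    have htmem : tl[K'] ∈ x :: xs := by
      have h1 : tl[K'] ∈ h :: tl := List.mem_cons_of_mem _ (List.getElem_mem hK')
      have := PySem.List.mem_sorted (x :: xs) (fun y => y) false tl[K']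
      rw [hs] at this
      exact this.mp h1
    have hμt : h ≤ tl[K'] := hμle _ htmem
    simp only [remK, hs, hsortErase, List.getElem?_cons_succ, ht]
    by_cases hcase : h = tl[K']
    · -- the minimum equals the threshold: all elements ≥ t, drop one more copy of t
      have hfil : (x :: xs).filter (fun y => y < tl[K']) = [] := by
        refine List.filter_eq_nil_iff.mpr ?_
        intro a ha
        simp only [decide_eq_true_eq]
        exact not_lt.mpr (hcase ▸ hμle a ha)
      have hfil' : ((x :: xs).erase h).filter (fun y => y < tl[K']) = [] := by
        refine List.filter_eq_nil_iff.mpr ?_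
        intro a ha
        simp only [decide_eq_true_eq]
        exact not_lt.mpr (hcase ▸ hμle a (List.mem_of_mem_erase ha))
      rw [hfil, hfil']
      rw [fd_pop tl[K'] (x :: xs) (((K' + 1 : Nat) : Int) + 1 - (([] : List Int).length : Int))
            (hcase ▸ hμmem) (by simp; push_cast; omega)]
      rw [← hcase]
      congr 1
      simp
    · have hlt : h < tl[K'] := lt_of_le_of_ne hμt hcase
      have hcnt := count_erase tl[K'] h hlt (x :: xs) hμmem
      rw [fd_skip tl[K'] h hlt (x :: xs) _ hμmem]
      congr 1
      push_cast
      omega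

theorem L1 : ∀ (K : Nat) (l : List Int), K ≤ l.length → aLoop K l = remK K l := by
  intro K
  induction K with
  | zero => intro l _; rfl
  | succ K' ih =>
    intro l hl
    have hne : l ≠ [] := by
      cases l
      · simp at hl
      · simp
    obtain ⟨x, xs, rfl⟩ := List.exists_cons_of_ne_nil hne
    have hμmem : xs.foldl min x ∈ x :: xs := by
      rcases PySem.List.foldl_min_mem xs x with h | h
      · rw [h]; exact List.mem_cons_self
      · exact List.mem_cons_of_mem _ h
    have hlen : (aStep (x :: xs)).length = xs.length := by
      rw [aStep_erase]
      have := List.length_erase_of_mem hμmem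
      simpa using this
    have : aLoop (K' + 1) (x :: xs) = aLoop K' (aStep (x :: xs)) := rfl
    rw [this, ih _ (by simp at hl; omega)]
    exact core_step K' (x :: xs) hne (by simpa using hl)

-- ===== VERDICT (by name: the statement is the Claim_ definition above) =====
theorem n_max_spec : Claim_equal_n_max := by
  intro n lista _ hpre
  unfold Spec_n_max n_max n_max_alt
  by_cases hk : (lista.length : Int) - n ≤ 0
  · have hK0 : ((lista.length : Int) - n).toNat = 0 := by omega
    rw [hK0, if_pos hk]
    rfl
  · have hpre' : 0 ≤ n := hpre
    have hKle : ((lista.length : Int) - n).toNat ≤ lista.length := by omega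
    rw [if_neg hk, L1 _ _ hKle]
    obtain ⟨K'', hKK⟩ : ∃ K'', ((lista.length : Int) - n).toNat = K'' + 1 :=
      ⟨((lista.length : Int) - n).toNat - 1, by omega⟩
    have hidx : (lista.length : Int) - n - 1 = ((K'' : Nat) : Int) := by omega
    rw [hKK, hidx, PySem.List.pyGet?_natCast]
    simp only [remK]
    rcases hget : (PySem.List.sorted lista (fun x => x) false)[K'']? with _ | t
    · rfl
    · dsimp only
      congr 1
      omega
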